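-- pv_equiv track=rewrite | github.com/hdean-ssp/genero-tools | scripts/parse_headers.py | _join_broken_lines
-- ===== SOURCE A (Python) =====
-- from typing import List, Dict, Tuple, Optional
--
-- def _join_broken_lines(lines: List[str]) -> List[str]:
--     """
--     Join lines that are broken in the middle (continuation lines).
--
--     Args:
--         lines: Header lines
--
--     Returns:
--         List of joined lines
--     """
--     joined = []
--     i = 0
--     while i < len(lines):
--         line = lines[i]
--
--         # Check if next line is a continuation (doesn't start with # or is empty)
--         while i + 1 < len(lines):
--             next_line = lines[i + 1]
--             # If next line doesn't start with # and isn't empty, it's a continuation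
--             if next_line.strip() and not next_line.strip().startswith('#'):
--                 # Join the lines
--                 line = line.rstrip('\n') + ' ' + next_line.lstrip('#').strip()
--                 i += 1
--             else:
--                 break
--
--         joined.append(line)
--         i += 1
--
--     return joined
-- ===== SOURCE B (Python) =====
-- from typing import List
--
-- def _join_broken_lines(lines: List[str]) -> List[str]:
--     """Single flat pass: keep the group being built in `last`; each later line
--     either merges into `last` (continuation) or flushes it and starts a new group."""
--     joined = []
--     last = None
--     for line in lines:
--         s = line.strip()
--         if last is not None and s and not s.startswith('#'):
--             last = last.rstrip('\n') + ' ' + line.lstrip('#').strip()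
--         else:
--             if last is not None:
--                 joined.append(last)
--             last = line
--     if last is not None:
--         joined.append(last)
--     return joined
-- ===== Notes on version B (the rewrite author's own statement) =====
-- stated objective: simpler
-- what changed: Replaced A's nested while-loops (inner loop consumes continuation lines ahead of the index) by one flat pass that keeps the pending group in a variable and either merges each line into it or flushes it.
import Mathlib
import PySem

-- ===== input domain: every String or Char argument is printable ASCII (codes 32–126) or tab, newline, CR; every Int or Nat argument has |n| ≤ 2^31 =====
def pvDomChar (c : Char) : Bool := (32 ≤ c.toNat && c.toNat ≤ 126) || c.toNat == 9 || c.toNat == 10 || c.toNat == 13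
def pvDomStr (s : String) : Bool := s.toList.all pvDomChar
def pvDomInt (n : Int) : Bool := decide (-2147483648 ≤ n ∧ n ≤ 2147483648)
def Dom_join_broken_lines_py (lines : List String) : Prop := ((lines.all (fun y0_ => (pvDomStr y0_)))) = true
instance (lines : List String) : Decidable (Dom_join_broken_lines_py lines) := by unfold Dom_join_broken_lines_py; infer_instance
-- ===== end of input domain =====

-- B replaces A's nested consume-ahead while-loops by one flat pass holding the pending group
-- in a variable (objective: simpler); return values proved equal on the whole domain.

-- shared primitive helpers (exact ports of the Python string operations used by both versions)
-- s.rstrip('\n'): drop trailing '\n' characters (exact: rstrip with the single char '\n')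
def pvRstripNl (cs : List Char) : List Char := (cs.reverse.dropWhile (· == '\n')).reverse
-- s.lstrip('#'): drop leading '#' characters (exact: lstrip with the single char '#')
def pvLstripHash (cs : List Char) : List Char := cs.dropWhile (· == '#')
-- `next.strip() and not next.strip().startswith('#')` as a Bool
def pvCont (next : List Char) : Bool :=
  let s := PySem.Chars.strip next
  !s.isEmpty && !(PySem.Chars.startswith s ['#'])
-- `line.rstrip('\n') + ' ' + next.lstrip('#').strip()`
def pvMerge (line next : List Char) : List Char :=
  pvRstripNl line ++ [' '] ++ PySem.Chars.strip (pvLstripHash next)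

-- ===== PORT A =====
-- inner while: consume continuation lines into `line`, return (line, remaining lines)
def pvConsume (line : List Char) (rest : List (List Char)) : List Char × List (List Char) :=
  match rest with
  | [] => (line, [])
  | n :: t => if pvCont n then pvConsume (pvMerge line n) t else (line, n :: t)

theorem pvConsume_length (line : List Char) (rest : List (List Char)) :
    (pvConsume line rest).2.length ≤ rest.length := by
  induction rest generalizing line with
  | nil => simp [pvConsume]
  | cons n t ih =>
    simp only [pvConsume]
    split
    · exact le_trans (ih _) (by simp)
    · simp

-- outer while over the line index
def pvJoinA : List (List Char) → List (List Char)
  | [] => []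
  | l :: t =>
    let c := pvConsume l t
    c.1 :: pvJoinA c.2
termination_by ls => ls.length
decreasing_by
  have := pvConsume_length l t
  simpa using Nat.lt_succ_of_le this

def join_broken_lines_py (lines : List String) : List String :=
  (pvJoinA (lines.map String.toList)).map String.ofList

-- ===== PORT B =====
-- loop body of Source B: state = (joined, last)
def pvStepB (st : List (List Char) × Option (List Char)) (line : List Char) :
    List (List Char) × Option (List Char) :=
  match st.2 with
  | some last =>
      if pvCont line then (st.1, some (pvMerge last line))
      else (st.1 ++ [last], some line)
  | none => (st.1, some line)

def pvJoinB (ls : List (List Char)) : List (List Char) :=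
  let r := ls.foldl pvStepB ([], none)
  match r.2 with
  | none => r.1
  | some last => r.1 ++ [last]

def join_broken_lines_py_alt (lines : List String) : List String :=
  (pvJoinB (lines.map String.toList)).map String.ofList

-- ===== PRECONDITION & SPEC =====
def Spec_join_broken_lines_py (lines : List String) (out : List String) : Prop := out = join_broken_lines_py_alt lines
instance (lines : List String) (out : List String) : Decidable (Spec_join_broken_lines_py lines out) := by unfold Spec_join_broken_lines_py; infer_instance

-- ===== CLAIM (what is proved, stated in full; the proofs are below) =====
def Claim_equal_join_broken_lines_py : Prop := ∀ (lines : List String), Dom_join_broken_lines_py lines → Spec_join_broken_lines_py lines (join_broken_lines_py lines)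

-- ===== LEMMAS AND PROOFS =====

def pvFinishB (r : List (List Char) × Option (List Char)) : List (List Char) :=
  match r.2 with
  | none => r.1
  | some last => r.1 ++ [last]

theorem pvFoldB_some (rest : List (List Char)) :
    ∀ (j : List (List Char)) (last : List Char),
    pvFinishB (rest.foldl pvStepB (j, some last))
      = j ++ (pvConsume last rest).1 :: pvJoinA (pvConsume last rest).2 := by
  induction rest with
  | nil => intro j last; simp [pvFinishB, pvConsume, pvJoinA]
  | cons n t ih =>
    intro j last
    by_cases h : pvCont n
    · simp only [List.foldl_cons, pvStepB, h, if_pos, pvConsume]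
      exact ih j (pvMerge last n)
    · simp only [List.foldl_cons, pvStepB, h, pvConsume, Bool.false_eq_true, if_false]
      rw [ih (j ++ [last]) n]
      rw [pvJoinA]
      simp

theorem pvJoinA_eq_pvJoinB (ls : List (List Char)) : pvJoinA ls = pvJoinB ls := by
  cases ls with
  | nil => simp [pvJoinA, pvJoinB]
  | cons l t =>
    show pvJoinA (l :: t) = pvFinishB (List.foldl pvStepB ([], none) (l :: t))
    rw [List.foldl_cons]
    have h1 : pvStepB ([], none) l = ([], some l) := rfl
    rw [h1, pvFoldB_some t [] l, pvJoinA]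
    simp

-- ===== VERDICT (by name: the statement is the Claim_ definition above) =====
theorem join_broken_lines_py_spec : Claim_equal_join_broken_lines_py := by
  intro lines _
  unfold Spec_join_broken_lines_py join_broken_lines_py join_broken_lines_py_alt
  rw [pvJoinA_eq_pvJoinB]
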